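-- pv_equiv track=rewrite | github.com/AlanDoesCS/Virtual-Assistant | main_GUI.py | insert_newlines
-- ===== SOURCE A (Python) =====
-- def insert_newlines(string, every=144):
--     string = string.split(" ")
--     new_str = ""
--     for index in range(len(string)):
--         new_str += string[index] + " "
--         if (index + 1) % every == 0:
--             new_str += "\n"
--     return new_str
-- ===== SOURCE B (Python) =====
-- def insert_newlines(string, every=144):
--     words = string.split(" ")
--     parts = []
--     for i in range(0, len(words), every):
--         chunk = words[i:i + every]
--         parts.append(" ".join(chunk) + " ")
--         if len(chunk) == every:
--             parts.append("\n")
--     return "".join(parts)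
-- ===== Notes on version B (the rewrite author's own statement) =====
-- stated objective: alternative
-- what changed: Replaces the per-word modulo-counter loop over indices with a chunked pass: iterate in steps of 'every', slice out each chunk, emit ' '.join(chunk)+' ' and a newline only for full chunks, joining the pieces at the end.
-- outside the precondition, e.g. on insert_newlines('a b', -1): A returns 'a \nb \n', B returns ''; on insert_newlines('a b', 0): A raises ZeroDivisionError, B raises ValueError
import Mathlib
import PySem

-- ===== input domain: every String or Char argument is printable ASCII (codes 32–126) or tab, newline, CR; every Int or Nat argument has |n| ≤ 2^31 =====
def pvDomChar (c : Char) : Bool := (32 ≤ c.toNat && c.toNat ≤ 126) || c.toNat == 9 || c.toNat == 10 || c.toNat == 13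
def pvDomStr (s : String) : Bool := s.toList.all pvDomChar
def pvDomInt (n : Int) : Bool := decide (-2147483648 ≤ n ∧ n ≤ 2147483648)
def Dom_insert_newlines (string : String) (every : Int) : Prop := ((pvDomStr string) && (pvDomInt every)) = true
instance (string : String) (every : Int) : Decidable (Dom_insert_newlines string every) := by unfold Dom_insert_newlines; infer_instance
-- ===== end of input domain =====

-- B replaces A's per-word modulo-counter loop with a chunked slice-and-join pass; same cost, different decomposition.


-- ===== PORT A =====
def insert_newlines (string : String) (every : Int) : String :=
  let ws := PySem.Chars.splitOn string.toList [' ']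
  let new_str : List Char :=
    (PySem.List.pyRange 0 (ws.length : Int) 1).foldl
      (fun new_str index =>
        let new_str := new_str ++ PySem.List.pyGetD ws index [] ++ [' ']
        if PySem.Int.mod (index + 1) every = 0 then new_str ++ ['\n'] else new_str)
      []
  String.ofList new_str

-- ===== PORT B =====
def insert_newlines_alt (string : String) (every : Int) : String :=
  let words := PySem.Chars.splitOn string.toList [' ']
  let parts : List (List Char) :=
    (PySem.List.pyRange 0 (words.length : Int) every).foldl
      (fun parts i =>
        let chunk := PySem.List.slice words (some i) (some (i + every))
        let parts := parts ++ [PySem.Chars.join [' '] chunk ++ [' ']]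
        if (chunk.length : Int) = every then parts ++ [['\n']] else parts)
      []
  String.ofList (PySem.Chars.join [] parts)

-- ===== PRECONDITION & SPEC =====
-- Pre_ excludes every = 0, where A raises ZeroDivisionError (and B ValueError), and every < 0,
-- a nonsensical group size outside the natural domain, where A's newline-every-|every|-words output is incidental.
def Pre_insert_newlines (string : String) (every : Int) : Prop := 1 ≤ every
instance (string : String) (every : Int) : Decidable (Pre_insert_newlines string every) := by unfold Pre_insert_newlines; infer_instance
def pvWitness_insert_newlines : String × Int := ("hello world out there", 2)

def Spec_insert_newlines (string : String) (every : Int) (out : String) : Prop := out = insert_newlines_alt string every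
instance (string : String) (every : Int) (out : String) : Decidable (Spec_insert_newlines string every out) := by unfold Spec_insert_newlines; infer_instance

-- ===== CLAIM (what is proved, stated in full; the proofs are below) =====
def Claim_equal_insert_newlines : Prop := ∀ (string : String) (every : Int), Dom_insert_newlines string every → Pre_insert_newlines string every → Spec_insert_newlines string every (insert_newlines string every)

-- ===== LEMMAS AND PROOFS =====

-- join with empty separator is flatten
theorem join_nil_sep (ps : List (List Char)) : PySem.Chars.join [] ps = ps.flatten := by
  match ps with
  | [] => simp [PySem.Chars.join_nil]
  | [p] => simp [PySem.Chars.join_singleton]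
  | p :: q :: rest =>
    rw [PySem.Chars.join_cons_cons, join_nil_sep (q :: rest)]
    simp

-- flatMap of word++" " over a nonempty word list is join-with-space plus a trailing space
theorem flatMap_space (ws : List (List Char)) (h : ws ≠ []) :
    ws.flatMap (fun w => w ++ [' ']) = PySem.Chars.join [' '] ws ++ [' '] := by
  match ws with
  | [p] => simp [PySem.Chars.join_singleton]
  | p :: q :: rest =>
    rw [PySem.Chars.join_cons_cons]
    have := flatMap_space (q :: rest) (by simp)
    simp only [List.flatMap_cons] at this ⊢
    rw [this]; simp

-- pyRange with positive step: nil and cons forms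
theorem pyRange_pos_nil (a b e : Int) (he : 0 < e) (h : b ≤ a) :
    PySem.List.pyRange a b e = [] := by
  rw [PySem.List.pyRange_of_pos a b he]
  simp [show ¬ a < b by omega]

theorem pyRange_pos_cons (a b e : Int) (he : 0 < e) (h : a < b) :
    PySem.List.pyRange a b e = a :: PySem.List.pyRange (a + e) b e := by
  rw [PySem.List.pyRange_of_pos a b he, PySem.List.pyRange_of_pos (a+e) b he]
  have key : ((b - a + e - 1) / e).toNat = (if a + e < b then ((b - (a+e) + e - 1) / e).toNat else 0) + 1 := by
    have h1 : b - a + e - 1 = (b - a - 1) + 1 * e := by ring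
    have h2 : b - (a+e) + e - 1 = (b - a - 1) + (-1+1) * e := by ring
    have q0 : 0 ≤ (b - a - 1) / e := Int.ediv_nonneg (by omega) (by omega)
    by_cases hc : a + e < b
    · simp only [hc, if_true]
      rw [h1, Int.add_mul_ediv_right _ _ (by omega : e ≠ 0), h2]
      rw [show (-1+1)*e = (-1)*e + 1*e by ring, ← add_assoc, Int.add_mul_ediv_right _ _ (by omega : e ≠ 0), Int.add_mul_ediv_right _ _ (by omega : e ≠ 0)]
      omega
    · simp only [hc, if_false]
      have hle : b - a - 1 < e := by omega
      have : (b - a - 1) / e = 0 := Int.ediv_eq_zero_of_lt (by omega) (by omega)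
      rw [h1, Int.add_mul_ediv_right _ _ (by omega : e ≠ 0), this]
      omega
  rw [if_pos h, key]
  rw [List.range_succ_eq_map]
  simp only [List.map_cons, List.map_map]
  congr 1
  · simp
  · apply List.map_congr_left
    intro k _
    simp [Function.comp]
    ring

-- mapping ws[j] over range(a, a+m) is the slice of the word list
theorem map_pyGetD_range (ws : List (List Char)) (m a : Nat) (h : a + m ≤ ws.length) :
    (PySem.List.pyRange (a : Int) ((a : Int) + (m : Int)) 1).map
        (fun j => PySem.List.pyGetD ws j []) = (ws.drop a).take m := by
  induction m generalizing a with
  | zero => simp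
  | succ mm ih =>
    rw [PySem.List.pyRange_one_cons (by push_cast; omega)]
    simp only [List.map_cons]
    have ha : a < ws.length := by omega
    have h1 : ((a:Int) + 1) = ((a+1 : Nat) : Int) := by push_cast; ring
    have h2 : ((a:Int) + ((mm+1:Nat) : Int)) = ((a+1:Nat):Int) + (mm:Nat) := by push_cast; ring
    rw [h2, h1, ih (a+1) (by omega)]
    simp [PySem.List.pyGetD_natCast, List.getD_eq_getElem?_getD, ha]
    rw [List.take_succ_cons.symm.trans rfl]
    rw [← List.drop_eq_getElem_cons ha]

-- inside a chunk starting at a multiple of e, the modulo test fires only at the chunk's last index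
theorem mod_inner (e k i : Int) (he : 1 ≤ e) (hk : e ∣ k) (h1 : k ≤ i) (h2 : i + 1 < k + e) :
    ¬ PySem.Int.mod (i + 1) e = 0 := by
  rw [PySem.Int.mod_eq_zero_iff_dvd]
  intro hd
  have hdk : e ∣ (i + 1 - k) := Int.dvd_sub hd hk
  have := Int.le_of_dvd (by omega) hdk
  omega

-- a flat run of words with trailing spaces and no newline
theorem run_flat (ws : List (List Char)) (e k : Int) (he : 1 ≤ e) (hk : 0 ≤ k) (hdvd : e ∣ k)
    (m : Nat) (hm : k.toNat + m ≤ ws.length) (hin : (k + (m : Int)) + 1 ≤ k + e) :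
    (PySem.List.pyRange k (k + (m : Int)) 1).flatMap
        (fun i => PySem.List.pyGetD ws i [] ++ [' '] ++
          (if PySem.Int.mod (i + 1) e = 0 then ['\n'] else [])) =
    ((ws.drop k.toNat).take m).flatMap (fun w => w ++ [' ']) := by
  have hcast : (k.toNat : Int) = k := Int.toNat_of_nonneg hk
  have hcongr : ∀ i ∈ PySem.List.pyRange k (k + (m : Int)) 1,
      (PySem.List.pyGetD ws i [] ++ [' '] ++
        (if PySem.Int.mod (i + 1) e = 0 then ['\n'] else [])) =
      (fun j => PySem.List.pyGetD ws j [] ++ [' ']) i := by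
    intro i hi
    rw [PySem.List.mem_pyRange_one] at hi
    rw [if_neg (mod_inner e k i he hdvd hi.1 (by omega))]
    simp
  rw [List.flatMap_congr hcongr]
  have : (PySem.List.pyRange k (k + (m : Int)) 1).flatMap (fun j => PySem.List.pyGetD ws j [] ++ [' ']) =
      ((PySem.List.pyRange k (k + (m : Int)) 1).map (fun j => PySem.List.pyGetD ws j [])).flatMap (fun w => w ++ [' ']) := by
    rw [List.flatMap_map]
  rw [this, ← hcast, map_pyGetD_range ws m k.toNat hm]
  have hmax : (max k 0).toNat = k.toNat := by omega
  simp [hmax]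

-- the heart: A's flat output from index k on equals B's flat output from chunk start k on
theorem chunk_main (ws : List (List Char)) (e : Int) (he : 1 ≤ e) :
    ∀ (m : Nat) (k : Int), 0 ≤ k → ((ws.length : Int) - k).toNat ≤ m → e ∣ k →
    (PySem.List.pyRange k (ws.length : Int) 1).flatMap
        (fun i => PySem.List.pyGetD ws i [] ++ [' '] ++
          (if PySem.Int.mod (i + 1) e = 0 then ['\n'] else [])) =
    (PySem.List.pyRange k (ws.length : Int) e).flatMap
        (fun i =>
          let chunk := PySem.List.slice ws (some i) (some (i + e))
          PySem.Chars.join [' '] chunk ++ [' '] ++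
            (if (chunk.length : Int) = e then ['\n'] else [])) := by
  intro m
  induction m with
  | zero =>
    intro k hk hb _
    have hkn : (ws.length : Int) ≤ k := by omega
    rw [PySem.List.pyRange_one_eq_nil hkn, pyRange_pos_nil _ _ e (by omega) hkn]
    simp
  | succ mm ih =>
    intro k hk hb hdvd
    by_cases hkn : (ws.length : Int) ≤ k
    · rw [PySem.List.pyRange_one_eq_nil hkn, pyRange_pos_nil _ _ e (by omega) hkn]
      simp
    have hkn' : k < (ws.length : Int) := by omega
    clear hkn
    have hcast : (k.toNat : Int) = k := Int.toNat_of_nonneg hk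
    rw [pyRange_pos_cons k _ e (by omega) hkn', List.flatMap_cons]
    dsimp only
    have hchunk : PySem.List.slice ws (some k) (some (k + e)) =
        (ws.drop k.toNat).take ((k + e).toNat - k.toNat) := by
      rw [PySem.List.slice_toNat ws hk (by omega)]
    by_cases hfull : k + e ≤ (ws.length : Int)
    · -- full chunk
      have hel : (k + e).toNat - k.toNat = e.toNat := by omega
      have hlen : ((PySem.List.slice ws (some k) (some (k + e))).length : Int) = e := by
        rw [hchunk, hel]
        simp
        omega
      rw [PySem.List.pyRange_one_append k (k + e) _ (by omega) hfull, List.flatMap_append]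
      rw [ih (k + e) (by omega) (by omega) (dvd_add hdvd (dvd_refl e))]
      simp only [hlen]
      congr 1
      -- head chunk: split off the last index
      rw [PySem.List.pyRange_one_append k (k + e - 1) (k + e) (by omega) (by omega),
          List.flatMap_append,
          show k + e - 1 = k + ((e.toNat - 1 : Nat) : Int) by omega,
          run_flat ws e k he hk hdvd (e.toNat - 1) (by omega) (by omega)]
      rw [show k + ((e.toNat - 1 : Nat) : Int) = k + e - 1 by omega,
          show PySem.List.pyRange (k + e - 1) (k + e) 1 = [k + e - 1] from by
            have hsing := PySem.List.pyRange_one_singleton (k + e - 1)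
            rw [show k + e - 1 + 1 = k + e by ring] at hsing
            exact hsing]
      rw [List.flatMap_singleton]
      have hmodlast : PySem.Int.mod (k + e - 1 + 1) e = 0 := by
        rw [show k + e - 1 + 1 = k + e by ring, PySem.Int.mod_eq_zero_iff_dvd]
        exact dvd_add hdvd (dvd_refl e)
      rw [if_pos hmodlast]
      -- combine front words and last word into the chunk
      have hlast : PySem.List.pyGetD ws (k + e - 1) [] = ws[k.toNat + (e.toNat - 1)]'(by omega) := by
        rw [show k + e - 1 = ((k.toNat + (e.toNat - 1) : Nat) : Int) by omega,
            PySem.List.pyGetD_natCast, List.getD_eq_getElem?_getD]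
        simp [show k.toNat + (e.toNat - 1) < ws.length by omega]
      have hsplit : (ws.drop k.toNat).take e.toNat =
          (ws.drop k.toNat).take (e.toNat - 1) ++ [ws[k.toNat + (e.toNat - 1)]'(by omega)] := by
        have hlt : e.toNat - 1 < (ws.drop k.toNat).length := by simp; omega
        have hts := List.take_succ (l := ws.drop k.toNat) (i := e.toNat - 1)
        rw [List.getElem?_eq_getElem hlt, show e.toNat - 1 + 1 = e.toNat by omega] at hts
        rw [hts]
        simp [List.getElem_drop]
      rw [hchunk, hel, hsplit]
      have hne : (ws.drop k.toNat).take (e.toNat - 1) ++ [ws[k.toNat + (e.toNat - 1)]'(by omega)] ≠ [] := by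
        simp
      rw [← flatMap_space _ hne, List.flatMap_append, List.flatMap_singleton]
      simp [hlast]
    · -- partial last chunk
      push_neg at hfull
      have hnil : PySem.List.pyRange (k + e) (ws.length : Int) e = [] :=
        pyRange_pos_nil _ _ e (by omega) (by omega)
      rw [hnil, List.flatMap_nil, List.append_nil]
      have htake : (k + e).toNat - k.toNat = e.toNat := by omega
      have hchunk' : PySem.List.slice ws (some k) (some (k + e)) = ws.drop k.toNat := by
        rw [hchunk, htake, List.take_of_length_le (by simp; omega)]
      have hlenne : ¬ (((PySem.List.slice ws (some k) (some (k + e))).length : Int) = e) := by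
        rw [hchunk']
        simp
        omega
      rw [if_neg hlenne]
      rw [show (ws.length : Int) = k + ((ws.length - k.toNat : Nat) : Int) by omega,
          run_flat ws e k he hk hdvd (ws.length - k.toNat) (by omega) (by omega)]
      rw [List.take_of_length_le (by simp)]
      rw [flatMap_space _ (by simp; omega), hchunk']
      simp

-- flatten distributes over flatMap
theorem flatten_flatMap (l : List Int) (G : Int → List (List Char)) :
    (l.flatMap G).flatten = l.flatMap (fun i => (G i).flatten) := by
  induction l with
  | nil => simp
  | cons x t ih => simp [ih]

-- ===== VERDICT (by name: the statement is the Claim_ definition above) =====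
theorem insert_newlines_spec : Claim_equal_insert_newlines := by
  intro string every _ hpre
  unfold Spec_insert_newlines insert_newlines insert_newlines_alt
  simp only []
  set ws := PySem.Chars.splitOn string.toList [' '] with hws
  congr 1
  -- A side: the loop is a flatMap
  rw [PySem.List.foldl_congr_mem _ _
      (fun acc i => acc ++ (PySem.List.pyGetD ws i [] ++ [' '] ++
        (if PySem.Int.mod (i + 1) every = 0 then ['\n'] else []))) _
      (by intro acc x _; dsimp only; split <;> simp)]
  rw [PySem.List.foldl_append_eq_flatMap, List.nil_append]
  -- B side: the loop is a flatMap of chunk pieces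
  rw [PySem.List.foldl_congr_mem _ _
      (fun acc i => acc ++ ([PySem.Chars.join [' '] (PySem.List.slice ws (some i) (some (i + every))) ++ [' ']] ++
        (if ((PySem.List.slice ws (some i) (some (i + every))).length : Int) = every then [['\n']] else []))) _
      (by intro acc x _; dsimp only; split <;> simp)]
  rw [PySem.List.foldl_append_eq_flatMap, List.nil_append]
  rw [join_nil_sep, flatten_flatMap]
  rw [chunk_main ws every hpre ws.length 0 le_rfl (by omega) (dvd_zero every)]
  apply List.flatMap_congr
  intro i _
  dsimp only
  split <;> simp
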